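-- pv_equiv track=rewrite | github.com/Parkat13/VKR | main.py | only_number
-- ===== SOURCE A (Python) =====
-- def only_number(
--         link):
--     link = link[1:-1]
--     number = 0
--     list_of_numbers = []
--     flag = 1
--     for i in link:
--         if flag == 1:
--             if i.isdigit():
--                 number = number*10 + int(i)
--             else:
--                 if number != 0:
--                     list_of_numbers = list_of_numbers + [number]
--                 number = 0
--                 if i.isalpha():
--                     flag = 0
--         elif i == ',' or i == ';':
--             flag = 1
--     if number != 0:
--         list_of_numbers = list_of_numbers + [number]
--     return list_of_numbers
-- ===== SOURCE B (Python) =====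
-- def _split_segments(s):
--     # split on ',' and ';' into segments (delimiters dropped)
--     segs = []
--     cur = []
--     for ch in s:
--         if ch == ',' or ch == ';':
--             segs.append(cur)
--             cur = []
--         else:
--             cur.append(ch)
--     segs.append(cur)
--     return segs
--
--
-- def only_number(link):
--     result = []
--     for seg in _split_segments(link[1:-1]):
--         number = 0
--         for ch in seg:
--             if ch.isdigit():
--                 number = number * 10 + int(ch)
--             else:
--                 if number != 0:
--                     result.append(number)
--                 number = 0
--                 if ch.isalpha():
--                     break  # letters invalidate the rest of this segment
--         if number != 0:
--             result.append(number)
--     return result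
-- ===== Notes on version B (the rewrite author's own statement) =====
-- stated objective: alternative
-- what changed: Replaces A's single-pass flag state machine with a two-phase decomposition: first split the stripped string into segments at the delimiter characters (comma and semicolon), then scan each segment for digit runs, breaking out of a segment at the first letter.
import Mathlib
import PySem

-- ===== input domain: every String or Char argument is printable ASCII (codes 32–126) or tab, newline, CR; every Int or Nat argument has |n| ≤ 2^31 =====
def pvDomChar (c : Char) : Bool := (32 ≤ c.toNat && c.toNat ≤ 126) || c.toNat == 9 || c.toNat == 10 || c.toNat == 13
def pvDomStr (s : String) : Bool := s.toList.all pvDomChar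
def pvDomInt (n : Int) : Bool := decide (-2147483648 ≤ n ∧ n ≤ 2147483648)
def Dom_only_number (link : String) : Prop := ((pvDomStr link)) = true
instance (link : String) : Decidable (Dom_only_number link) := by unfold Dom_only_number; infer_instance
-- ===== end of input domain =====

-- B replaces A's flag state machine by a split-into-segments pass followed by a per-segment
-- digit scan with early break; same return value on the whole ASCII domain (alternative decomposition).

-- int(i) for a single char i: in both Pythons it is reached only when i.isdigit() holds,
-- where PySem.Int.ofChars? is `some`, so the `getD 0` default is never used.
def pvDigitVal (c : Char) : Int := (PySem.Int.ofChars? [c]).getD 0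

-- ===== PORT A =====
-- state (number, list_of_numbers, flag)
def pvStepA (st : Int × List Int × Int) (c : Char) : Int × List Int × Int :=
  if st.2.2 = 1 then
    if PySem.Chars.isdigit c then (st.1 * 10 + pvDigitVal c, st.2.1, st.2.2)
    else
      (0, if st.1 ≠ 0 then st.2.1 ++ [st.1] else st.2.1,
          if PySem.Chars.isalpha c then 0 else st.2.2)
  else if c = ',' ∨ c = ';' then (st.1, st.2.1, 1)
  else st

def only_number (link : String) : List Int :=
  let cs := PySem.List.slice link.toList (some 1) (some (-1))   -- link[1:-1]
  let st := cs.foldl pvStepA (0, ([] : List Int), 1)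
  if st.1 ≠ 0 then st.2.1 ++ [st.1] else st.2.1

-- ===== PORT B =====
-- _split_segments: fold over the chars with state (segs, cur); final segs.append(cur)
def pvSplitStep (st : List (List Char) × List Char) (c : Char) : List (List Char) × List Char :=
  if c = ',' ∨ c = ';' then (st.1 ++ [st.2], []) else (st.1, st.2 ++ [c])

-- the inner `for ch in seg` loop (with its trailing flush; `break` returns early)
def pvInner : List Char → Int → List Int → List Int
  | [], n, acc => if n ≠ 0 then acc ++ [n] else acc
  | c :: cs, n, acc =>
    if PySem.Chars.isdigit c then pvInner cs (n * 10 + pvDigitVal c) acc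
    else
      let acc' := if n ≠ 0 then acc ++ [n] else acc
      if PySem.Chars.isalpha c then acc' else pvInner cs 0 acc'

def only_number_alt (link : String) : List Int :=
  let s := PySem.List.slice link.toList (some 1) (some (-1))    -- link[1:-1]
  let st := s.foldl pvSplitStep ([], [])
  (st.1 ++ [st.2]).foldl (fun acc seg => pvInner seg 0 acc) []

-- ===== PRECONDITION & SPEC =====
def Spec_only_number (link : String) (out : List Int) : Prop := out = only_number_alt link
instance (link : String) (out : List Int) : Decidable (Spec_only_number link out) := by unfold Spec_only_number; infer_instance

-- ===== CLAIM (what is proved, stated in full; the proofs are below) =====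
def Claim_equal_only_number : Prop := ∀ (link : String), Dom_only_number link → Spec_only_number link (only_number link)

-- ===== LEMMAS AND PROOFS =====

def pvFlush (n : Int) : List Int := if n ≠ 0 then [n] else []

-- A's state machine as a structurally recursive producer of the emitted suffix
def pvRunA : List Char → Int → Int → List Int
  | [], n, _ => pvFlush n
  | c :: cs, n, flag =>
    if flag = 1 then
      if PySem.Chars.isdigit c then pvRunA cs (n * 10 + pvDigitVal c) flag
      else pvFlush n ++ pvRunA cs 0 (if PySem.Chars.isalpha c then 0 else flag)
    else if c = ',' ∨ c = ';' then pvRunA cs n 1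
    else pvRunA cs n flag

theorem pvA_fold (l : List Char) : ∀ (n : Int) (lst : List Int) (flag : Int),
    (if (l.foldl pvStepA (n, lst, flag)).1 ≠ 0
       then (l.foldl pvStepA (n, lst, flag)).2.1 ++ [(l.foldl pvStepA (n, lst, flag)).1]
       else (l.foldl pvStepA (n, lst, flag)).2.1)
      = lst ++ pvRunA l n flag := by
  induction l with
  | nil => intro n lst flag; simp [pvRunA, pvFlush]; split_ifs <;> simp
  | cons c cs ih =>
    intro n lst flag
    simp only [List.foldl_cons, pvRunA, pvStepA]
    by_cases h1 : flag = 1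
    · by_cases hd : PySem.Chars.isdigit c
      · simp [h1, hd, ih]
      · simp only [h1, hd, if_true, Bool.false_eq_true, if_false, ih]
        by_cases hn : n ≠ 0 <;> simp [hn, pvFlush]
    · by_cases hc : c = ',' ∨ c = ';' <;> simp [h1, hc, ih]

-- cons-style splitter at the delimiter characters: (first segment, remaining segments)
def pvSplitD : List Char → List Char × List (List Char)
  | [] => ([], [])
  | c :: cs =>
    if c = ',' ∨ c = ';' then ([], (pvSplitD cs).1 :: (pvSplitD cs).2)
    else (c :: (pvSplitD cs).1, (pvSplitD cs).2)

theorem pvSplit_fold (l : List Char) : ∀ (segs : List (List Char)) (cur : List Char),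
    (l.foldl pvSplitStep (segs, cur)).1 ++ [(l.foldl pvSplitStep (segs, cur)).2]
      = segs ++ (cur ++ (pvSplitD l).1) :: (pvSplitD l).2 := by
  induction l with
  | nil => intro segs cur; simp [pvSplitD]
  | cons c cs ih =>
    intro segs cur
    by_cases hc : c = ',' ∨ c = ';' <;>
      simp [List.foldl_cons, pvSplitStep, pvSplitD, hc, ih]

theorem pvInner_acc (s : List Char) : ∀ (n : Int) (acc : List Int),
    pvInner s n acc = acc ++ pvInner s n [] := by
  induction s with
  | nil =>
    intro n acc
    by_cases hn : n ≠ 0 <;> simp [pvInner, hn]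
  | cons c cs ih =>
    intro n acc
    by_cases hd : PySem.Chars.isdigit c
    · simp only [pvInner, hd, if_true]
      exact ih _ _
    · by_cases ha : PySem.Chars.isalpha c <;> by_cases hn : n ≠ 0 <;>
        simp only [pvInner, hd, ha, hn, Bool.false_eq_true, if_true, if_false,
                   ite_true, ite_false, ne_eq, not_true_eq_false, not_false_eq_true]
      · simp
      · simp
      · rw [ih 0 (acc ++ [n]), ih 0 ([] ++ [n])]; simp
      · exact ih _ _

theorem pvFoldInner_acc (segs : List (List Char)) : ∀ (acc : List Int),
    segs.foldl (fun a seg => pvInner seg 0 a) acc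
      = acc ++ segs.foldl (fun a seg => pvInner seg 0 a) [] := by
  induction segs with
  | nil => intro acc; simp
  | cons h t ih =>
    intro acc
    rw [List.foldl_cons, List.foldl_cons, ih (pvInner h 0 acc), ih (pvInner h 0 []),
        pvInner_acc h 0 acc]
    simp

def pvRunSegs (segs : List (List Char)) : List Int :=
  segs.foldl (fun acc seg => pvInner seg 0 acc) []

theorem pvRunSegs_cons (h : List Char) (t : List (List Char)) :
    pvRunSegs (h :: t) = pvInner h 0 [] ++ pvRunSegs t := by
  unfold pvRunSegs
  rw [List.foldl_cons]
  exact pvFoldInner_acc t _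

theorem pvDelim_facts (c : Char) (hc : c = ',' ∨ c = ';') :
    PySem.Chars.isdigit c = false ∧ PySem.Chars.isalpha c = false := by
  rcases hc with rfl | rfl <;> exact ⟨by decide, by decide⟩

theorem pvInner_nil (n : Int) : pvInner [] n [] = pvFlush n := by
  by_cases hn : n ≠ 0 <;> simp [pvInner, pvFlush, hn]

theorem pvInner_digit (c : Char) (h : List Char) (n : Int)
    (hd : PySem.Chars.isdigit c = true) :
    pvInner (c :: h) n [] = pvInner h (n * 10 + pvDigitVal c) [] := by
  simp [pvInner, hd]

theorem pvInner_stop (c : Char) (h : List Char) (n : Int)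
    (hd : PySem.Chars.isdigit c = false) (ha : PySem.Chars.isalpha c = true) :
    pvInner (c :: h) n [] = pvFlush n := by
  by_cases hn : n ≠ 0 <;> simp [pvInner, pvFlush, hd, ha, hn]

theorem pvInner_cont (c : Char) (h : List Char) (n : Int)
    (hd : PySem.Chars.isdigit c = false) (ha : PySem.Chars.isalpha c = false) :
    pvInner (c :: h) n [] = pvFlush n ++ pvInner h 0 [] := by
  by_cases hn : n ≠ 0
  · simp only [pvInner, hd, ha, Bool.false_eq_true, if_false, ite_true,
               List.nil_append]
    rw [if_pos hn, pvInner_acc h 0 [n]]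
    simp [pvFlush, hn]
  · simp [pvInner, pvFlush, hd, ha, hn]

theorem pvMain (l : List Char) :
    (∀ n : Int, pvRunA l n 1 = pvInner (pvSplitD l).1 n [] ++ pvRunSegs (pvSplitD l).2)
    ∧ (∀ f : Int, f ≠ 1 → pvRunA l 0 f = pvRunSegs (pvSplitD l).2) := by
  induction l with
  | nil =>
    constructor
    · intro n
      show pvFlush n = pvInner [] n [] ++ pvRunSegs []
      rw [pvInner_nil]; simp [pvRunSegs]
    · intro f hf
      show pvFlush 0 = pvRunSegs []
      simp [pvFlush, pvRunSegs]
  | cons c cs ih =>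
    obtain ⟨ih1, ih2⟩ := ih
    by_cases hc : c = ',' ∨ c = ';'
    · obtain ⟨hd, ha⟩ := pvDelim_facts c hc
      constructor
      · intro n
        simp only [pvRunA, pvSplitD, hd, ha, hc, if_true, Bool.false_eq_true, if_false,
                   ite_true]
        rw [ih1 0, pvRunSegs_cons, pvInner_nil]
      · intro f hf
        simp only [pvRunA, pvSplitD, hc, if_true, hf, if_false, ite_true]
        rw [ih1 0, pvRunSegs_cons]
    · constructor
      · intro n
        by_cases hd : PySem.Chars.isdigit c
        · simp only [pvRunA, pvSplitD, hc, hd, if_true, Bool.false_eq_true, if_false,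
                     ite_false]
          rw [ih1, pvInner_digit c _ n hd]
        · by_cases ha : PySem.Chars.isalpha c
          · simp only [pvRunA, pvSplitD, hc, hd, ha, if_true, Bool.false_eq_true, if_false,
                       ite_true, ite_false]
            rw [ih2 0 (by decide), pvInner_stop c _ n (by simp [hd]) ha]
          · simp only [pvRunA, pvSplitD, hc, hd, ha, if_true, Bool.false_eq_true, if_false,
                       ite_true, ite_false]
            rw [ih1 0, pvInner_cont c _ n (by simp [hd]) (by simp [ha])]
            simp
      · intro f hf
        by_cases hf1 : f = 1
        · exact absurd hf1 hf
        · simp only [pvRunA, pvSplitD, hc, hf1, if_false, ite_false]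
          rw [ih2 f hf]

-- ===== VERDICT (by name: the statement is the Claim_ definition above) =====
theorem only_number_spec : Claim_equal_only_number := by
  intro link _
  unfold Spec_only_number
  simp only [only_number, only_number_alt]
  rw [pvA_fold, pvSplit_fold]
  simp only [List.nil_append]
  show pvRunA _ 0 1 = pvRunSegs ((pvSplitD _).1 :: (pvSplitD _).2)
  rw [pvRunSegs_cons, (pvMain _).1 0]
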